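-- pv_equiv track=rewrite | github.com/tung-qle/fast-deformable-factorization | hierarchical_comp_new.py | balanced_permutation
-- ===== SOURCE A (Python) =====
-- def balanced_permutation(k):
--     if k == 1:
--         return [1]
--     if k == 2:
--         return [1, 2]
--     if k % 2 == 0:
--         left_perm = balanced_permutation((k // 2) - 1)
--         right_perm = [i + (k + 1) // 2 for i in balanced_permutation(k // 2)]
--         return [k // 2] + left_perm + right_perm
--     if k % 2 == 1:
--         left_perm = balanced_permutation(k // 2)
--         right_perm = [i + (k + 1) // 2 for i in balanced_permutation(k // 2)]
--         return [k // 2 + 1] + left_perm + right_perm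
-- ===== SOURCE B (Python) =====
-- def balanced_permutation(k):
--     # Iterative preorder with an explicit stack of (size, offset) subproblems:
--     # a single pass appending into one output list, no list concatenation or re-mapping.
--     out = []
--     stack = [(k, 0)]
--     while stack:
--         n, off = stack.pop()
--         if n == 1:
--             out.append(1 + off)
--         elif n == 2:
--             out.append(1 + off)
--             out.append(2 + off)
--         elif n % 2 == 0:
--             out.append(n // 2 + off)
--             stack.append((n // 2, off + (n + 1) // 2))
--             stack.append((n // 2 - 1, off))
--         else:
--             out.append(n // 2 + 1 + off)
--             stack.append((n // 2, off + (n + 1) // 2))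
--             stack.append((n // 2, off))
--     return out
-- ===== Notes on version B (the rewrite author's own statement) =====
-- stated objective: faster
-- what changed: Replaces the divide-and-concatenate recursion (which re-maps the whole right half with an offset at every level) by an iterative preorder loop over an explicit stack of (size, offset) subproblems that appends each element once into a single output list.
-- outside the precondition, e.g. on balanced_permutation(0): A raises RecursionError, B does not finish within the time limit
import Mathlib
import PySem

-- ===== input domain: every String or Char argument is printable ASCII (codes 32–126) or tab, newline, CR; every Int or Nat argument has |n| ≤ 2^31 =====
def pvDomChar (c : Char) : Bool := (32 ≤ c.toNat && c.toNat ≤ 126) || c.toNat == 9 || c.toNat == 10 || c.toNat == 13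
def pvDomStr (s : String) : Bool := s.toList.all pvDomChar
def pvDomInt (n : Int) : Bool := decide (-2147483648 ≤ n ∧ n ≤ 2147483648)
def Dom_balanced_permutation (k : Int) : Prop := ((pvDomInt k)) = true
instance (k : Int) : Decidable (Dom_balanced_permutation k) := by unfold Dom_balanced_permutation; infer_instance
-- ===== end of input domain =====

-- B replaces A's divide-and-concatenate recursion by a single iterative preorder fill
-- driven by an explicit stack of (size, offset) subproblems (objective: faster, O(k) vs O(k log k)).

-- ===== PORT A =====
-- A's recursion on an Int argument, made total with fuel (k.toNat + 1 levels are ample: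
-- the argument strictly shrinks at every recursive call on the admitted inputs k ≥ 1).
def balanced_permutation_goA : Nat → Int → List Int
  | 0, _ => []
  | fuel + 1, k =>
    if k = 1 then [1]
    else if k = 2 then [1, 2]
    else if PySem.Int.mod k 2 = 0 then
      let left_perm := balanced_permutation_goA fuel (PySem.Int.floordiv k 2 - 1)
      let right_perm := (balanced_permutation_goA fuel (PySem.Int.floordiv k 2)).map
        (fun i => i + PySem.Int.floordiv (k + 1) 2)
      [PySem.Int.floordiv k 2] ++ left_perm ++ right_perm
    else
      -- Python: 'if k % 2 == 1', which always holds here (k % 2 ∈ {0,1})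
      let left_perm := balanced_permutation_goA fuel (PySem.Int.floordiv k 2)
      let right_perm := (balanced_permutation_goA fuel (PySem.Int.floordiv k 2)).map
        (fun i => i + PySem.Int.floordiv (k + 1) 2)
      [PySem.Int.floordiv k 2 + 1] ++ left_perm ++ right_perm

def balanced_permutation (k : Int) : List Int :=
  balanced_permutation_goA (k.toNat + 1) k

-- ===== PORT B =====
-- B's while-loop over the explicit stack, made total with fuel (one unit per popped
-- subproblem; the total of the stacked sizes bounds the number of iterations).
def balanced_permutation_goB : Nat → List (Int × Int) → List Int → List Int
  | _, [], out => out
  | 0, _ :: _, out => out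
  | fuel + 1, (n, off) :: stack, out =>
    if n = 1 then balanced_permutation_goB fuel stack (out ++ [1 + off])
    else if n = 2 then balanced_permutation_goB fuel stack (out ++ [1 + off, 2 + off])
    else if PySem.Int.mod n 2 = 0 then
      balanced_permutation_goB fuel
        ((PySem.Int.floordiv n 2 - 1, off) ::
          (PySem.Int.floordiv n 2, off + PySem.Int.floordiv (n + 1) 2) :: stack)
        (out ++ [PySem.Int.floordiv n 2 + off])
    else
      balanced_permutation_goB fuel
        ((PySem.Int.floordiv n 2, off) ::
          (PySem.Int.floordiv n 2, off + PySem.Int.floordiv (n + 1) 2) :: stack)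
        (out ++ [PySem.Int.floordiv n 2 + 1 + off])

def balanced_permutation_alt (k : Int) : List Int :=
  balanced_permutation_goB (k.toNat + 1) [(k, 0)] []

-- ===== PRECONDITION & SPEC =====
-- Pre_ excludes k ≤ 0, on which Python A recurses forever (RecursionError).
def Pre_balanced_permutation (k : Int) : Prop := 1 ≤ k
instance (k : Int) : Decidable (Pre_balanced_permutation k) := by
  unfold Pre_balanced_permutation; infer_instance

def pvWitness_balanced_permutation : Int := (5)

def Spec_balanced_permutation (k : Int) (out : List Int) : Prop := out = balanced_permutation_alt k
instance (k : Int) (out : List Int) : Decidable (Spec_balanced_permutation k out) := by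
  unfold Spec_balanced_permutation; infer_instance

-- ===== CLAIM (what is proved, stated in full; the proofs are below) =====
def Claim_equal_balanced_permutation : Prop :=
  ∀ (k : Int), Dom_balanced_permutation k → Pre_balanced_permutation k →
    Spec_balanced_permutation k (balanced_permutation k)

-- ===== LEMMAS AND PROOFS =====

-- The common mathematical value, as a total function of the size (a Nat).
def bpSpec : Nat → List Int
  | 0 => []
  | 1 => [1]
  | 2 => [1, 2]
  | n + 3 =>
    let m := (n + 3) / 2
    if (n + 3) % 2 = 0 then
      (m : Int) :: (bpSpec (m - 1) ++ (bpSpec m).map (fun i => i + (((n + 4) / 2 : Nat) : Int)))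
    else
      ((m : Int) + 1) :: (bpSpec m ++ (bpSpec m).map (fun i => i + (((n + 4) / 2 : Nat) : Int)))
  decreasing_by all_goals omega

theorem bp_floordiv_nonneg (k : Int) (h : 0 ≤ k) :
    PySem.Int.floordiv k 2 = ((k.toNat / 2 : Nat) : Int) := by
  rw [PySem.Int.floordiv_eq_ediv_of_pos (by omega : (0:Int) < 2)]
  omega

theorem bp_mod_nonneg (k : Int) (h : 0 ≤ k) :
    PySem.Int.mod k 2 = ((k.toNat % 2 : Nat) : Int) := by
  rw [PySem.Int.mod_eq_emod_of_pos (by omega : (0:Int) < 2)]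
  omega

-- A's fuelled recursion computes bpSpec on every admitted input.
theorem bp_goA_eq (fuel : Nat) : ∀ (k : Int), 1 ≤ k → k.toNat < fuel →
    balanced_permutation_goA fuel k = bpSpec k.toNat := by
  induction fuel with
  | zero => intro k _ h; omega
  | succ fuel ih =>
    intro k hk hfuel
    by_cases h1 : k = 1
    · subst h1; simp [balanced_permutation_goA, bpSpec]
    by_cases h2 : k = 2
    · subst h2; simp [balanced_permutation_goA, bpSpec]
    have hk3 : 3 ≤ k := by omega
    have hfd := bp_floordiv_nonneg k (by omega)
    have hfd1 := bp_floordiv_nonneg (k + 1) (by omega)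
    have hmod := bp_mod_nonneg k (by omega)
    obtain ⟨n, hn⟩ : ∃ n : Nat, k.toNat = n + 3 := ⟨k.toNat - 3, by omega⟩
    have hhalf : (k + 1).toNat = k.toNat + 1 := by omega
    have hL : balanced_permutation_goA fuel (PySem.Int.floordiv k 2)
        = bpSpec (k.toNat / 2) := by
      rw [hfd]
      have := ih ((k.toNat / 2 : Nat) : Int) (by omega) (by rw [Int.toNat_natCast]; omega)
      rwa [Int.toNat_natCast] at this
    by_cases he : k.toNat % 2 = 0
    · have hL1 : balanced_permutation_goA fuel (PySem.Int.floordiv k 2 - 1)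
          = bpSpec (k.toNat / 2 - 1) := by
        rw [hfd]
        have h1 : ((k.toNat / 2 : Nat) : Int) - 1 = ((k.toNat / 2 - 1 : Nat) : Int) := by omega
        rw [h1]
        have := ih ((k.toNat / 2 - 1 : Nat) : Int) (by omega) (by rw [Int.toNat_natCast]; omega)
        rwa [Int.toNat_natCast] at this
      rw [balanced_permutation_goA]
      rw [if_neg h1, if_neg h2, if_pos (by rw [hmod]; exact_mod_cast he)]
      rw [hL, hL1, hfd, hfd1, hn]
      rw [bpSpec]
      simp only [hn] at he
      rw [if_pos he]
      simp [hhalf, hn]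
      intro a _
      omega
    · rw [balanced_permutation_goA]
      rw [if_neg h1, if_neg h2, if_neg (by rw [hmod]; intro hc; apply he; exact_mod_cast hc)]
      rw [hL, hfd, hfd1, hn]
      rw [bpSpec]
      simp only [hn] at he
      rw [if_neg he]
      simp [hhalf, hn]
      intro a _
      omega

-- The total size stacked up, bounding B's iteration count.
def bpSizes (stack : List (Int × Int)) : Nat :=
  (stack.map (fun p => p.1.toNat)).sum

-- The value bpSpec assigns to a whole stack of pending subproblems.
def bpPending (stack : List (Int × Int)) : List Int :=
  stack.flatMap (fun p => (bpSpec p.1.toNat).map (fun i => i + p.2))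

-- B's loop invariant: with enough fuel it appends exactly the pending output.
theorem bp_goB_eq (fuel : Nat) : ∀ (stack : List (Int × Int)) (out : List Int),
    (∀ p ∈ stack, 1 ≤ p.1) → bpSizes stack ≤ fuel →
    balanced_permutation_goB fuel stack out = out ++ bpPending stack := by
  induction fuel with
  | zero =>
    intro stack out hpos hsz
    cases stack with
    | nil => simp [balanced_permutation_goB, bpPending]
    | cons p rest =>
      exfalso
      have := hpos p (by simp)
      simp [bpSizes] at hsz
      omega
  | succ fuel ih =>
    intro stack out hpos hsz
    cases stack with
    | nil => simp [balanced_permutation_goB, bpPending]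
    | cons p rest =>
      obtain ⟨n, off⟩ := p
      have hn1 : 1 ≤ n := hpos (n, off) (by simp)
      have hrest : ∀ p ∈ rest, 1 ≤ p.1 := fun p hp => hpos p (by simp [hp])
      have hszr : bpSizes ((n, off) :: rest) = n.toNat + bpSizes rest := by
        simp [bpSizes]
      by_cases h1 : n = 1
      · subst h1
        rw [balanced_permutation_goB, if_pos rfl]
        rw [ih rest _ hrest (by simp [bpSizes] at hsz ⊢; omega)]
        simp [bpPending, bpSpec]
      by_cases h2 : n = 2
      · subst h2
        rw [balanced_permutation_goB, if_neg (by norm_num), if_pos rfl]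
        rw [ih rest _ hrest (by simp [bpSizes] at hsz ⊢; omega)]
        simp [bpPending, bpSpec]
      have hn3 : 3 ≤ n := by omega
      have hfd := bp_floordiv_nonneg n (by omega)
      have hfd1 := bp_floordiv_nonneg (n + 1) (by omega)
      have hmod := bp_mod_nonneg n (by omega)
      obtain ⟨m, hm⟩ : ∃ m : Nat, n.toNat = m + 3 := ⟨n.toNat - 3, by omega⟩
      have hhalf : (n + 1).toNat = n.toNat + 1 := by omega
      by_cases he : n.toNat % 2 = 0
      · rw [balanced_permutation_goB, if_neg h1, if_neg h2,
          if_pos (by rw [hmod]; exact_mod_cast he)]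
        have hpos' : ∀ p ∈ ((PySem.Int.floordiv n 2 - 1, off) ::
            (PySem.Int.floordiv n 2, off + PySem.Int.floordiv (n + 1) 2) :: rest), 1 ≤ p.1 := by
          intro p hp
          simp only [List.mem_cons] at hp
          rcases hp with rfl | rfl | h
          · show 1 ≤ PySem.Int.floordiv n 2 - 1
            rw [hfd]; omega
          · show 1 ≤ PySem.Int.floordiv n 2
            rw [hfd]; omega
          · exact hrest p h
        have hsz' : bpSizes ((PySem.Int.floordiv n 2 - 1, off) ::
            (PySem.Int.floordiv n 2, off + PySem.Int.floordiv (n + 1) 2) :: rest) ≤ fuel := by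
          rw [hszr] at hsz
          have e2 : ∀ (a b : Int × Int), bpSizes (a :: b :: rest)
              = a.1.toNat + (b.1.toNat + bpSizes rest) := by
            intro a b; simp [bpSizes]
          rw [e2]
          simp only [hfd]
          omega
        rw [ih _ _ hpos' hsz']
        have hrec : bpSpec n.toNat
            = (PySem.Int.floordiv n 2 + 0) ::
              (bpSpec ((PySem.Int.floordiv n 2 - 1).toNat)
                ++ (bpSpec ((PySem.Int.floordiv n 2).toNat)).map
                    (fun i => i + PySem.Int.floordiv (n + 1) 2)) := by
          rw [hm, bpSpec]
          simp only [hm] at he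
          rw [if_pos he]
          have c1 : PySem.Int.floordiv n 2 + 0 = ((m + 3) / 2 : Nat) := by rw [hfd]; omega
          have c2 : (PySem.Int.floordiv n 2 - 1).toNat = (m + 3) / 2 - 1 := by rw [hfd]; omega
          have c3 : (PySem.Int.floordiv n 2).toNat = (m + 3) / 2 := by rw [hfd]; omega
          have c4 : PySem.Int.floordiv (n + 1) 2 = ((m + 4) / 2 : Nat) := by rw [hfd1]; omega
          rw [c1, c2, c3, c4]
        simp only [bpPending, List.flatMap_cons, hrec]
        simp [Function.comp, add_comm, add_left_comm]
      · rw [balanced_permutation_goB, if_neg h1, if_neg h2,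
          if_neg (by rw [hmod]; intro hc; apply he; exact_mod_cast hc)]
        have hpos' : ∀ p ∈ ((PySem.Int.floordiv n 2, off) ::
            (PySem.Int.floordiv n 2, off + PySem.Int.floordiv (n + 1) 2) :: rest), 1 ≤ p.1 := by
          intro p hp
          simp only [List.mem_cons] at hp
          rcases hp with rfl | rfl | h
          · show 1 ≤ PySem.Int.floordiv n 2
            rw [hfd]; omega
          · show 1 ≤ PySem.Int.floordiv n 2
            rw [hfd]; omega
          · exact hrest p h
        have hsz' : bpSizes ((PySem.Int.floordiv n 2, off) ::
            (PySem.Int.floordiv n 2, off + PySem.Int.floordiv (n + 1) 2) :: rest) ≤ fuel := by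
          rw [hszr] at hsz
          have e2 : ∀ (a b : Int × Int), bpSizes (a :: b :: rest)
              = a.1.toNat + (b.1.toNat + bpSizes rest) := by
            intro a b; simp [bpSizes]
          rw [e2]
          simp only [hfd]
          omega
        rw [ih _ _ hpos' hsz']
        have hrec : bpSpec n.toNat
            = (PySem.Int.floordiv n 2 + 1 + 0) ::
              (bpSpec ((PySem.Int.floordiv n 2).toNat)
                ++ (bpSpec ((PySem.Int.floordiv n 2).toNat)).map
                    (fun i => i + PySem.Int.floordiv (n + 1) 2)) := by
          rw [hm, bpSpec]
          simp only [hm] at he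
          rw [if_neg he]
          have c1 : PySem.Int.floordiv n 2 + 1 + 0 = ((m + 3) / 2 : Nat) + 1 := by rw [hfd]; omega
          have c3 : (PySem.Int.floordiv n 2).toNat = (m + 3) / 2 := by rw [hfd]; omega
          have c4 : PySem.Int.floordiv (n + 1) 2 = ((m + 4) / 2 : Nat) := by rw [hfd1]; omega
          rw [c1, c3, c4]
        simp only [bpPending, List.flatMap_cons, hrec]
        simp [Function.comp, add_comm, add_left_comm]

-- ===== VERDICT (by name: the statement is the Claim_ definition above) =====
theorem balanced_permutation_spec : Claim_equal_balanced_permutation := by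
  intro k _ hk
  unfold Spec_balanced_permutation balanced_permutation balanced_permutation_alt
  rw [bp_goA_eq _ k hk (by omega)]
  rw [bp_goB_eq _ [(k, 0)] [] (by intro p hp; simp at hp; subst hp; simpa using hk)
      (by simp [bpSizes])]
  simp [bpPending]
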